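-- pv_equiv track=rewrite | github.com/anilbharadia/vedicscriptures.bhagavad-gita | src/recompute_speakers.py | rebuild_with_speaker
-- ===== SOURCE A (Python) =====
-- from collections import OrderedDict
--
-- def rebuild_with_speaker(data: OrderedDict, speaker: str) -> OrderedDict:
--     # Ensure speaker inserted just before slok.
--     new_data = OrderedDict()
--     for k, v in data.items():
--         if k == 'slok':
--             new_data['speaker'] = speaker
--         if k == 'speaker':
--             # Skip old speaker entry (we will reinsert)
--             continue
--         new_data[k] = v
--     return new_data
-- ===== SOURCE B (Python) =====
-- from collections import OrderedDict
--
--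
-- def rebuild_with_speaker(data: OrderedDict, speaker: str) -> OrderedDict:
--     # Build the pair list without any old 'speaker' entry, then splice the new
--     # ('speaker', speaker) pair in just before 'slok' (if present) by index.
--     pairs = [(k, v) for k, v in data.items() if k != 'speaker']
--     keys = [k for k, _ in pairs]
--     if 'slok' in keys:
--         pairs.insert(keys.index('slok'), ('speaker', speaker))
--     return OrderedDict(pairs)
-- ===== Notes on version B (the rewrite author's own statement) =====
-- stated objective: alternative
-- what changed: B replaces A's single conditional insert-as-you-go pass with a build-then-splice decomposition: it first builds the pair list with the old 'speaker' entry filtered out, then locates 'slok' by index and splices the new ('speaker', speaker) pair in at that position before constructing the OrderedDict.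
import Mathlib
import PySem

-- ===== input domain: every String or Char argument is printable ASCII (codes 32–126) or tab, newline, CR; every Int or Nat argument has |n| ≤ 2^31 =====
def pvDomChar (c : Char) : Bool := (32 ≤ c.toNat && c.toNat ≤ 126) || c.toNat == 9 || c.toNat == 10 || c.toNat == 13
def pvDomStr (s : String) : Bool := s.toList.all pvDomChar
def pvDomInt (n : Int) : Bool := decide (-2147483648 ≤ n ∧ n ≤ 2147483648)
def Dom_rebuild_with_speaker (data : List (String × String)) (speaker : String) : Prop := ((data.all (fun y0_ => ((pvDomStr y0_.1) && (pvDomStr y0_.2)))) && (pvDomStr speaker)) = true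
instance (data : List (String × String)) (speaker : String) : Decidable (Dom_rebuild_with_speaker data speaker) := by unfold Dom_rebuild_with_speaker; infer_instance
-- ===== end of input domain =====

-- B rebuilds the dict by filter / index / splice instead of A's single conditional pass (objective: alternative decomposition).

-- ===== PORT A =====
def rebuild_with_speaker (data : List (String × String)) (speaker : String) : List (String × String) :=
  (data.foldl (fun new_data kv =>
      let new_data := if kv.1 = "slok" then new_data.insert "speaker" speaker else new_data
      if kv.1 = "speaker" then new_data else new_data.insert kv.1 kv.2)
    (PySem.Dict.empty : PySem.Dict String String)).items

-- ===== PORT B =====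
def rebuild_with_speaker_alt (data : List (String × String)) (speaker : String) : List (String × String) :=
  let pairs := data.filter (fun kv => kv.1 ≠ "speaker")
  let keys := pairs.map Prod.fst
  let pairs :=
    if "slok" ∈ keys then
      match PySem.List.index? keys "slok" with
      | some i => PySem.List.insert pairs (i : Int) ("speaker", speaker)
      | none => pairs
    else pairs
  (PySem.Dict.ofList pairs).items

-- ===== PRECONDITION & SPEC =====
-- Pre_ requires the keys of data to be distinct: data is a Python (Ordered)Dict, whose keys are
-- unique by construction, so this excludes no input the Python function can receive.
def Pre_rebuild_with_speaker (data : List (String × String)) (speaker : String) : Prop :=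
  (data.map Prod.fst).Nodup
instance (data : List (String × String)) (speaker : String) : Decidable (Pre_rebuild_with_speaker data speaker) := by unfold Pre_rebuild_with_speaker; infer_instance

def pvWitness_rebuild_with_speaker : (List (String × String)) × String :=
  ([("id", "1"), ("speaker", "old"), ("slok", "text"), ("tej", "t")], "Krishna")

def Spec_rebuild_with_speaker (data : List (String × String)) (speaker : String) (out : List (String × String)) : Prop := out = rebuild_with_speaker_alt data speaker
instance (data : List (String × String)) (speaker : String) (out : List (String × String)) : Decidable (Spec_rebuild_with_speaker data speaker out) := by unfold Spec_rebuild_with_speaker; infer_instance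

-- ===== CLAIM (what is proved, stated in full; the proofs are below) =====
def Claim_equal_rebuild_with_speaker : Prop := ∀ (data : List (String × String)) (speaker : String), Dom_rebuild_with_speaker data speaker → Pre_rebuild_with_speaker data speaker → Spec_rebuild_with_speaker data speaker (rebuild_with_speaker data speaker)

-- ===== LEMMAS AND PROOFS =====

-- The spliced pair list both programs produce, written as one structural recursion.
def pvWoven (speaker : String) : List (String × String) → List (String × String)
  | [] => []
  | (k, v) :: t =>
      if k = "speaker" then pvWoven speaker t
      else if k = "slok" then ("speaker", speaker) :: (k, v) :: pvWoven speaker t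
      else (k, v) :: pvWoven speaker t

theorem pvWoven_of_no_slok (speaker : String) (l : List (String × String))
    (h : "slok" ∉ l.map Prod.fst) :
    pvWoven speaker l = l.filter (fun kv => kv.1 ≠ "speaker") := by
  induction l with
  | nil => rfl
  | cons kv t ih =>
    obtain ⟨k, v⟩ := kv
    simp only [List.map_cons, List.mem_cons] at h
    have h1 : ¬ "slok" = k := fun hh => h (Or.inl hh)
    have h2 : "slok" ∉ t.map Prod.fst := fun hh => h (Or.inr hh)
    simp only [pvWoven, List.filter_cons]
    by_cases hk : k = "speaker"
    · simp [hk, ih h2]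
    · simp [hk, Ne.symm h1, ih h2]

-- B's splice equals pvWoven, given distinct keys.
theorem pvWoven_eq_splice (speaker : String) (data : List (String × String))
    (hnd : (data.map Prod.fst).Nodup) :
    pvWoven speaker data =
      (let pairs := data.filter (fun kv => kv.1 ≠ "speaker")
       let keys := pairs.map Prod.fst
       if "slok" ∈ keys then
         match PySem.List.index? keys "slok" with
         | some i => PySem.List.insert pairs (i : Int) ("speaker", speaker)
         | none => pairs
       else pairs) := by
  induction data with
  | nil => rfl
  | cons kv t ih =>
    obtain ⟨k, v⟩ := kv
    simp only [List.map_cons, List.nodup_cons] at hnd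
    obtain ⟨hknot, hndt⟩ := hnd
    by_cases hsp : k = "speaker"
    · subst hsp
      rw [show pvWoven speaker (("speaker", v) :: t) = pvWoven speaker t from by
        simp [pvWoven]]
      rw [List.filter_cons_of_neg (by simp)]
      simpa using ih hndt
    · by_cases hsl : k = "slok"
      · subst hsl
        have hnoslok : "slok" ∉ t.map Prod.fst := hknot
        rw [show pvWoven speaker (("slok", v) :: t) =
              ("speaker", speaker) :: ("slok", v) :: pvWoven speaker t from by
          simp [pvWoven]]
        rw [pvWoven_of_no_slok speaker t hnoslok]
        rw [List.filter_cons_of_pos (by simp)]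
        simp only [List.map_cons]
        rw [if_pos (List.mem_cons_self ..)]
        rw [PySem.List.index?_cons_self]
        simp [PySem.List.insert_zero]
      · rw [show pvWoven speaker ((k, v) :: t) = (k, v) :: pvWoven speaker t from by
          simp [pvWoven, hsp, hsl]]
        rw [List.filter_cons_of_pos (by simp [hsp])]
        by_cases hm : "slok" ∈ (t.filter (fun kv => kv.1 ≠ "speaker")).map Prod.fst
        · obtain ⟨i, hi⟩ := Option.isSome_iff_exists.1 ((PySem.List.index?_isSome_iff _ _).2 hm)
          obtain ⟨hk, -, -⟩ := PySem.List.getElem_of_index?_eq_some hi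
          simp only [List.length_map] at hk
          rw [ih hndt]
          simp only [List.map_cons]
          rw [if_pos (List.mem_cons.2 (Or.inr hm)), if_pos hm]
          simp only [PySem.List.index?_cons_of_ne _ hsl, hi]
          simp only [Option.map_some]
          rw [PySem.List.insert_natCast _ _ _ (le_of_lt hk),
              PySem.List.insert_natCast _ _ _ (by simp only [List.length_cons]; omega)]
          simp [List.take_succ_cons, List.drop_succ_cons]
        · have hnoslok : "slok" ∉ t.map Prod.fst := by
            intro hmem
            rcases List.mem_map.1 hmem with ⟨p, hp, hpe⟩
            exact hm (List.mem_map.2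
              ⟨p, List.mem_filter.2 ⟨hp, by simp [hpe]⟩, hpe⟩)
          rw [pvWoven_of_no_slok speaker t hnoslok]
          simp only [List.map_cons, List.mem_cons]
          rw [if_neg (not_or.2 ⟨fun h => hsl h.symm, hm⟩)]

-- Every key pvWoven produces is "speaker" or a key of the input.
theorem pvWoven_keys_sub (speaker x : String) (l : List (String × String))
    (h : x ∈ (pvWoven speaker l).map Prod.fst) :
    x = "speaker" ∨ x ∈ l.map Prod.fst := by
  induction l with
  | nil => simp [pvWoven] at h
  | cons kv t ih =>
    obtain ⟨k, v⟩ := kv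
    simp only [pvWoven] at h
    split_ifs at h with h1 h2
    · exact (ih h).imp id (fun hh => by simp [hh])
    · simp only [List.map_cons, List.mem_cons] at h
      rcases h with h | h | h
      · exact Or.inl h
      · exact Or.inr (by simp [h])
      · exact (ih h).imp id (fun hh => by simp [hh])
    · simp only [List.map_cons, List.mem_cons] at h
      rcases h with h | h
      · exact Or.inr (by simp [h])
      · exact (ih h).imp id (fun hh => by simp [hh])

theorem pvWoven_keys_nodup (speaker : String) (data : List (String × String))
    (hnd : (data.map Prod.fst).Nodup) :
    ((pvWoven speaker data).map Prod.fst).Nodup := by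
  induction data with
  | nil => simp [pvWoven]
  | cons kv t ih =>
    obtain ⟨k, v⟩ := kv
    simp only [List.map_cons, List.nodup_cons] at hnd
    obtain ⟨hknot, hndt⟩ := hnd
    have hfk : ((t.filter (fun kv => kv.1 ≠ "speaker")).map Prod.fst).Sublist (t.map Prod.fst) :=
      List.Sublist.map Prod.fst List.filter_sublist
    have hspf : "speaker" ∉ (t.filter (fun kv => kv.1 ≠ "speaker")).map Prod.fst := by
      intro hmem
      rcases List.mem_map.1 hmem with ⟨p, hp, hpe⟩
      have := (List.mem_filter.1 hp).2
      simp [hpe] at this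
    by_cases hsp : k = "speaker"
    · simpa [pvWoven, hsp] using ih hndt
    · by_cases hsl : k = "slok"
      · subst hsl
        rw [show pvWoven speaker (("slok", v) :: t) =
              ("speaker", speaker) :: ("slok", v) :: pvWoven speaker t from by
          simp [pvWoven]]
        rw [pvWoven_of_no_slok speaker t hknot]
        simp only [List.map_cons, List.nodup_cons, List.mem_cons]
        refine ⟨?_, ?_, hndt.sublist hfk⟩
        · rintro (h | h)
          · exact absurd h (by decide)
          · exact hspf h
        · exact fun h => hknot (hfk.subset h)
      · rw [show pvWoven speaker ((k, v) :: t) = (k, v) :: pvWoven speaker t from by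
          simp [pvWoven, hsp, hsl]]
        simp only [List.map_cons, List.nodup_cons]
        refine ⟨fun h => ?_, ih hndt⟩
        rcases pvWoven_keys_sub speaker k t h with h | h
        · exact hsp h
        · exact hknot h

-- A's loop body, named so the fold lemma can rewrite one application at a time
-- (definitionally the lambda in the port of A).
def pvStep (speaker : String) (new_data : PySem.Dict String String)
    (kv : String × String) : PySem.Dict String String :=
  let new_data := if kv.1 = "slok" then new_data.insert "speaker" speaker else new_data
  if kv.1 = "speaker" then new_data else new_data.insert kv.1 kv.2

-- A's loop, run from any dict whose keys are disjoint from everything still to be inserted, appends pvWoven.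
theorem pvFoldA (speaker : String) (data : List (String × String))
    (d : PySem.Dict String String)
    (hnd : (d.keys ++ (pvWoven speaker data).map Prod.fst).Nodup) :
    (data.foldl (pvStep speaker) d).items = d.items ++ pvWoven speaker data := by
  induction data generalizing d with
  | nil => simp [pvWoven]
  | cons kv t ih =>
    obtain ⟨k, v⟩ := kv
    rw [List.foldl_cons]
    by_cases hsp : k = "speaker"
    · have hw : pvWoven speaker ((k, v) :: t) = pvWoven speaker t := by simp [pvWoven, hsp]
      rw [hw] at hnd ⊢
      rw [show pvStep speaker d (k, v) = d from by simp [pvStep, hsp]]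
      exact ih d hnd
    · by_cases hsl : k = "slok"
      · have hw : pvWoven speaker ((k, v) :: t) =
            ("speaker", speaker) :: (k, v) :: pvWoven speaker t := by simp [pvWoven, hsl]
        rw [hw] at hnd ⊢
        have hdisj := List.disjoint_of_nodup_append hnd
        have hspd : d.contains "speaker" = false := by
          rw [← Bool.not_eq_true, PySem.Dict.contains_iff_mem_keys]
          exact fun h => hdisj h (by simp)
        have hkeys1 := PySem.Dict.keys_insert_of_not_contains d speaker hspd
        have hitems1 := PySem.Dict.items_insert_of_not_contains d speaker hspd
        have hkd : (d.insert "speaker" speaker).contains k = false := by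
          rw [← Bool.not_eq_true, PySem.Dict.contains_iff_mem_keys, hkeys1]
          simp only [List.mem_append, List.mem_singleton]
          rintro (h | h)
          · exact hdisj h (by simp)
          · exact hsp h
        have hkeys2 := PySem.Dict.keys_insert_of_not_contains (d.insert "speaker" speaker) v hkd
        have hitems2 := PySem.Dict.items_insert_of_not_contains (d.insert "speaker" speaker) v hkd
        rw [show pvStep speaker d (k, v)
              = (d.insert "speaker" speaker).insert k v from by simp [pvStep, hsl]]
        rw [ih _ ?_]
        · rw [hitems2, hitems1]
          simp
        · rw [hkeys2, hkeys1, List.append_assoc, List.append_assoc]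
          exact hnd
      · have hw : pvWoven speaker ((k, v) :: t) = (k, v) :: pvWoven speaker t := by
          simp [pvWoven, hsp, hsl]
        rw [hw] at hnd ⊢
        have hdisj := List.disjoint_of_nodup_append hnd
        have hkd : d.contains k = false := by
          rw [← Bool.not_eq_true, PySem.Dict.contains_iff_mem_keys]
          exact fun h => hdisj h (by simp)
        rw [show pvStep speaker d (k, v) = d.insert k v from by simp [pvStep, hsp, hsl]]
        rw [ih _ ?_]
        · rw [PySem.Dict.items_insert_of_not_contains d v hkd]
          simp
        · rw [PySem.Dict.keys_insert_of_not_contains d v hkd, List.append_assoc]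
          exact hnd

theorem rebuild_with_speaker_eq_pvWoven (data : List (String × String)) (speaker : String)
    (hnd : (data.map Prod.fst).Nodup) :
    rebuild_with_speaker data speaker = pvWoven speaker data := by
  have heq : rebuild_with_speaker data speaker
      = (data.foldl (pvStep speaker) PySem.Dict.empty).items := rfl
  rw [heq, pvFoldA speaker data PySem.Dict.empty (by
    simpa [PySem.Dict.keys_empty] using pvWoven_keys_nodup speaker data hnd)]
  rfl

theorem rebuild_with_speaker_alt_eq_pvWoven (data : List (String × String)) (speaker : String)
    (hnd : (data.map Prod.fst).Nodup) :
    rebuild_with_speaker_alt data speaker = pvWoven speaker data := by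
  have h1 : rebuild_with_speaker_alt data speaker
      = (PySem.Dict.ofList (pvWoven speaker data)).items := by
    rw [pvWoven_eq_splice speaker data hnd]
    rfl
  rw [h1]
  have h := PySem.Dict.items_foldl_insert_fresh (l := pvWoven speaker data)
    (d := (PySem.Dict.empty : PySem.Dict String String))
    (k := Prod.fst) (v := Prod.snd)
    (by simp [PySem.Dict.contains_empty]) (pvWoven_keys_nodup speaker data hnd)
  simpa [PySem.Dict.ofList] using h

-- ===== VERDICT (by name: the statement is the Claim_ definition above) =====
theorem rebuild_with_speaker_spec : Claim_equal_rebuild_with_speaker := by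
  intro data speaker _ hpre
  unfold Spec_rebuild_with_speaker
  rw [rebuild_with_speaker_eq_pvWoven data speaker hpre,
      rebuild_with_speaker_alt_eq_pvWoven data speaker hpre]
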